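-- pv_equiv track=rewrite | github.com/ynaji80/HackerRank_solutions | largedst_rectangle.py | largestRectangle
-- ===== SOURCE A (Python) =====
-- def largestRectangle(h):
--     # Write your code here
--     maxi = 0
--     for i in range(len(h)-1):
--         mini1 = len(h[i:])*min(h[i:])
--         mini2 = len(h[i:])* min(h[:len(h)-i])
--         mini = max(mini1, mini2)
--         if maxi < mini:
--             maxi = mini
--     return maxi
-- ===== SOURCE B (Python) =====
-- def largestRectangle(h):
--     n = len(h)
--     if n < 2:
--         return 0
--     suf = [0] * n          # suf[i] = min(h[i:])
--     m = h[-1]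
--     for i in range(n - 1, -1, -1):
--         m = min(m, h[i])
--         suf[i] = m
--     pre = [0] * n          # pre[k] = min(h[:k+1])
--     m = h[0]
--     for i in range(n):
--         m = min(m, h[i])
--         pre[i] = m
--     best = 0
--     for i in range(n - 1):
--         L = n - i
--         cand = L * max(suf[i], pre[L - 1])
--         if cand > best:
--             best = cand
--     return best
-- ===== Notes on version B (the rewrite author's own statement) =====
-- stated objective: faster
-- what changed: Replaced the per-index min() over two slices (quadratic) by precomputed suffix-min and prefix-min arrays, giving O(1) work per index in a single final pass.
import Mathlib
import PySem

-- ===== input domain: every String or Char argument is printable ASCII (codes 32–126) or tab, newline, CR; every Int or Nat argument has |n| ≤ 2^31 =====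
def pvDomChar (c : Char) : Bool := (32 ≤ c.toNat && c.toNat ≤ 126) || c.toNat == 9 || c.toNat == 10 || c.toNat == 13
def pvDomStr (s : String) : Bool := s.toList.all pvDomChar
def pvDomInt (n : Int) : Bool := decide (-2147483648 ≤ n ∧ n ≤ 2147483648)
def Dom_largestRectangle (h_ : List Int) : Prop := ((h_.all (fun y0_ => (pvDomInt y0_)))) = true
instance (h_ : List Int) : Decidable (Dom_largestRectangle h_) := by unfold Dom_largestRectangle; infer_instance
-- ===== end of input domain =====

-- B replaces A's per-index min() over two slices with precomputed suffix-min and prefix-min arrays (O(n) vs O(n^2)).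

-- ===== PORT A =====
-- '.getD 0' is never reached: for i in range(len(h)-1) both slices are nonempty, so min() never raises.
def largestRectangle (h_ : List Int) : Int :=
  (PySem.List.pyRange 0 ((h_.length : Int) - 1) 1).foldl (fun maxi i =>
    let s1 := PySem.List.slice h_ (some i) none
    let s2 := PySem.List.slice h_ none (some ((h_.length : Int) - i))
    let mini1 := (s1.length : Int) * ((PySem.List.min? s1 (fun y => y)).getD 0)
    let mini2 := (s1.length : Int) * ((PySem.List.min? s2 (fun y => y)).getD 0)
    let mini := max mini1 mini2
    if maxi < mini then mini else maxi) 0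

-- ===== PORT B =====
-- suffix-min array: sufMins h !! i = min(h[i:])   (Source B's backward loop, as structural recursion)
def sufMins : List Int → List Int
  | [] => []
  | [x] => [x]
  | x :: y :: xs =>
    match sufMins (y :: xs) with
    | [] => [x]            -- unreachable: sufMins of a nonempty list is nonempty
    | m :: ms => min x m :: m :: ms

-- prefix-min array with running accumulator m: preAux m xs !! k = min(m, xs[0], …, xs[k])  (Source B's forward loop)
def preAux (m : Int) : List Int → List Int
  | [] => []
  | x :: xs => let m' := min m x; m' :: preAux m' xs

def largestRectangle_alt (h_ : List Int) : Int :=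
  let n := h_.length
  if n < 2 then 0
  else
    let suf := sufMins h_
    let pre := preAux (h_.headD 0) h_
    (PySem.List.pyRange 0 ((n : Int) - 1) 1).foldl (fun best i =>
      let L := (n : Int) - i
      let cand := L * max (PySem.List.pyGetD suf i 0) (PySem.List.pyGetD pre (L - 1) 0)
      if best < cand then cand else best) 0

-- ===== PRECONDITION & SPEC =====
def Spec_largestRectangle (h_ : List Int) (out : Int) : Prop := out = largestRectangle_alt h_
instance (h_ : List Int) (out : Int) : Decidable (Spec_largestRectangle h_ out) := by unfold Spec_largestRectangle; infer_instance

-- ===== CLAIM (what is proved, stated in full; the proofs are below) =====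
def Claim_equal_largestRectangle : Prop := ∀ (h_ : List Int), Dom_largestRectangle h_ → Spec_largestRectangle h_ (largestRectangle h_)

-- ===== LEMMAS AND PROOFS =====

theorem foldl_min_pull (a b : Int) (l : List Int) :
    l.foldl min (min a b) = min a (l.foldl min b) := by
  induction l generalizing b with
  | nil => rfl
  | cons x xs ih => simp [List.foldl, min_assoc, ih]

theorem sufMins_cons (x : Int) (xs : List Int) :
    sufMins (x :: xs) = (xs.foldl min x) :: sufMins xs := by
  induction xs generalizing x with
  | nil => rfl
  | cons y ys ih =>
    simp [sufMins, ih y, List.foldl, foldl_min_pull]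

theorem sufMins_getD (h : List Int) (j : Nat) (hj : j < h.length) :
    (sufMins h).getD j 0 = (h.drop (j+1)).foldl min (h.getD j 0) := by
  induction h generalizing j with
  | nil => simp at hj
  | cons a t ih =>
    rw [sufMins_cons]
    cases j with
    | zero => simp
    | succ j => simpa using ih j (by simpa using hj)

theorem preAux_getD (xs : List Int) (m : Int) (k : Nat) (hk : k < xs.length) :
    (preAux m xs).getD k 0 = (xs.take (k+1)).foldl min m := by
  induction xs generalizing m k with
  | nil => simp at hk
  | cons x t ih =>
    cases k with
    | zero => simp [preAux]
    | succ k => simpa [preAux] using ih (min m x) k (by simpa using hk)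

theorem min?_id_getD_cons (x : Int) (t : List Int) :
    (PySem.List.min? (x :: t) (fun y => y)).getD 0 = t.foldl min x := by
  rw [PySem.List.min?_id_cons]; rfl

-- ===== VERDICT (by name: the statement is the Claim_ definition above) =====
theorem largestRectangle_spec : Claim_equal_largestRectangle := by
  intro h hd
  unfold Spec_largestRectangle largestRectangle largestRectangle_alt
  by_cases hn : h.length < 2
  · have : PySem.List.pyRange 0 ((h.length : Int) - 1) 1 = [] := by
      apply List.eq_nil_of_length_eq_zero
      rw [PySem.List.length_pyRange_one]; omega
    simp [this, hn]
  · simp only [if_neg hn]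
    apply PySem.List.foldl_congr_mem'
    intro i hi acc
    rcases (PySem.List.mem_pyRange_one).1 hi with ⟨hi0, hilt⟩
    obtain ⟨j, rfl⟩ : ∃ j : Nat, i = (j : Int) := ⟨i.toNat, (Int.toNat_of_nonneg hi0).symm⟩
    have hjlt : j + 1 < h.length := by omega
    obtain ⟨h0, t, rfl⟩ : ∃ h0 t, h = h0 :: t := by
      cases h with
      | nil => simp at hn
      | cons a b => exact ⟨a, b, rfl⟩
    have hj' : j < (h0 :: t).length := by simp at hjlt ⊢; omega
    have hk1 : (h0 :: t).length - j = (t.length - j) + 1 := by simp at hj' ⊢; omega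
    have hL : ((h0::t).length : Int) - (j:Int) = (((h0::t).length - j : Nat) : Int) := by
      have := hj'; omega
    simp only [PySem.List.slice_from_natCast, hL, PySem.List.slice_to_natCast]
    rw [← List.getElem_cons_drop hj', hk1, List.take_succ_cons]
    have e1 : (PySem.List.min? ((h0::t)[j] :: List.drop (j+1) (h0::t)) fun y => y).getD 0
        = PySem.List.pyGetD (sufMins (h0::t)) (j : Int) 0 := by
      rw [min?_id_getD_cons, PySem.List.pyGetD_natCast, sufMins_getD _ _ hj',
        List.getD_eq_getElem _ _ hj']
    have hidx : ((t.length - j + 1 : Nat) : Int) - 1 = ((t.length - j : Nat) : Int) := by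
      push_cast; omega
    have e2 : (PySem.List.min? (h0 :: List.take (t.length - j) t) fun y => y).getD 0
        = PySem.List.pyGetD (preAux ((h0 :: t).headD 0) (h0 :: t)) (((t.length - j + 1 : Nat) : Int) - 1) 0 := by
      rw [min?_id_getD_cons, hidx, PySem.List.pyGetD_natCast,
        preAux_getD _ _ _ (by simp), ← hk1]
      rw [hk1, List.take_succ_cons]
      simp [List.foldl]
    have e3 : ((((h0::t)[j] :: List.drop (j+1) (h0::t)).length : Nat) : Int) = ((t.length - j + 1 : Nat) : Int) := by
      simp at hj' ⊢
    rw [e1, e2, e3, mul_max_of_nonneg _ _ (by positivity)]
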